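-- pv_equiv track=rewrite | github.com/hansmaulwurf23/aoc | 2021/day 03/d03.py | retain
-- ===== SOURCE A (Python) =====
-- def retain(l, idx, return_least=False):
--     if len(l) == 1:
--         return l
--
--     ones, zeros = [], []
--     for e in l:
--         if e[idx] == '1':
--             ones.append(e)
--         else:
--             zeros.append(e)
--
--     if len(zeros) > len(ones):
--         most, least = zeros, ones
--     elif len(zeros) < len(ones):
--         most, least = ones, zeros
--     else:
--         if return_least:
--             return zeros
--         else:
--             return ones
--
--     return least if return_least else most
-- ===== SOURCE B (Python) =====
-- def retain(l, idx, return_least=False):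
--     if len(l) == 1:
--         return l
--     o = sum(1 for e in l if e[idx] == '1')
--     z = len(l) - o
--     keep_one = (o < z) if return_least else (o >= z)
--     if keep_one:
--         return [e for e in l if e[idx] == '1']
--     return [e for e in l if e[idx] != '1']
-- ===== Notes on version B (the rewrite author's own statement) =====
-- stated objective: alternative
-- what changed: Replaces the two-list partition plus most/least selection with a count-then-filter decomposition: one counting pass decides which bit to keep, one filter pass builds the result.
import Mathlib
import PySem

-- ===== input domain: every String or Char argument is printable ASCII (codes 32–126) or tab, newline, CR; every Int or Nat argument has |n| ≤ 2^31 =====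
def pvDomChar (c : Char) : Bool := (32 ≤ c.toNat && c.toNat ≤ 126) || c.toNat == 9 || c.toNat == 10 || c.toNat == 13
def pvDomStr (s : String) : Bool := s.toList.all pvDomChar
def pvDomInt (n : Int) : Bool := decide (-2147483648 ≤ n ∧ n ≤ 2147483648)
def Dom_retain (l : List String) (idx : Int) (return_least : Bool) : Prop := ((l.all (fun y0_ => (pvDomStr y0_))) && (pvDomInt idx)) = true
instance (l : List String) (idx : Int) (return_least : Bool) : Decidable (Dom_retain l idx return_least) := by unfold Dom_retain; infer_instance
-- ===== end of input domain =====

-- B replaces A's two-list partition + most/least selection by count-then-filter (same O(n) cost, different decomposition).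

-- ===== PORT A =====
def retain (l : List String) (idx : Int) (return_least : Bool) : List String :=
  if l.length == 1 then l
  else
    let part := l.foldl
      (fun (acc : List String × List String) e =>
        if PySem.Str.pyGet? e idx == some '1' then (acc.1 ++ [e], acc.2)
        else (acc.1, acc.2 ++ [e]))
      ([], [])
    let ones := part.1
    let zeros := part.2
    if zeros.length > ones.length then
      if return_least then ones else zeros
    else if zeros.length < ones.length then
      if return_least then zeros else ones
    else
      if return_least then zeros else ones

-- ===== PORT B =====
def retain_alt (l : List String) (idx : Int) (return_least : Bool) : List String :=
  if l.length == 1 then l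
  else
    let o := l.countP (fun e => PySem.Str.pyGet? e idx == some '1')
    let z := l.length - o
    let keep_one := if return_least then decide (o < z) else decide (z ≤ o)
    if keep_one then l.filter (fun e => PySem.Str.pyGet? e idx == some '1')
    else l.filter (fun e => !(PySem.Str.pyGet? e idx == some '1'))

-- ===== PRECONDITION & SPEC =====
-- Pre_ excludes exactly the inputs where A raises IndexError: some element (when len(l) ≠ 1)
-- has idx out of range for Python string indexing.
def Pre_retain (l : List String) (idx : Int) (return_least : Bool) : Prop :=
  l.length = 1 ∨ ∀ e ∈ l, PySem.Raise.InRange e.toList.length idx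
instance (l : List String) (idx : Int) (return_least : Bool) : Decidable (Pre_retain l idx return_least) := by unfold Pre_retain; infer_instance

def pvWitness_retain : List String × Int × Bool := (["10", "01", "11"], 0, false)

def Spec_retain (l : List String) (idx : Int) (return_least : Bool) (out : List String) : Prop := out = retain_alt l idx return_least
instance (l : List String) (idx : Int) (return_least : Bool) (out : List String) : Decidable (Spec_retain l idx return_least out) := by unfold Spec_retain; infer_instance

-- ===== CLAIM (what is proved, stated in full; the proofs are below) =====
def Claim_equal_retain : Prop := ∀ (l : List String) (idx : Int) (return_least : Bool), Dom_retain l idx return_least → Pre_retain l idx return_least → Spec_retain l idx return_least (retain l idx return_least)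

-- ===== LEMMAS AND PROOFS =====

theorem foldl_partition (p : String → Bool) (l a b : List String) :
    l.foldl (fun (acc : List String × List String) e =>
        if p e then (acc.1 ++ [e], acc.2) else (acc.1, acc.2 ++ [e])) (a, b)
      = (a ++ l.filter p, b ++ l.filter (fun e => !p e)) := by
  induction l generalizing a b with
  | nil => simp
  | cons x xs ih => by_cases h : p x <;> simp [h, ih]

theorem filter_split_length (p : String → Bool) (l : List String) :
    (l.filter p).length + (l.filter (fun e => !p e)).length = l.length := by
  induction l with
  | nil => simp
  | cons x xs ih => by_cases h : p x <;> simp [h] <;> omega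

-- ===== VERDICT (by name: the statement is the Claim_ definition above) =====
theorem retain_spec : Claim_equal_retain := by
  intro l idx rl _ _
  unfold Spec_retain retain retain_alt
  by_cases h1 : l.length == 1
  · simp [h1]
  · simp only [h1]
    rw [foldl_partition]
    simp only [List.nil_append]
    have hc : l.countP (fun e => PySem.Str.pyGet? e idx == some '1')
        = (l.filter (fun e => PySem.Str.pyGet? e idx == some '1')).length := by
      simp [List.countP_eq_length_filter]
    have hs := filter_split_length (fun e => PySem.Str.pyGet? e idx == some '1') l
    cases rl <;> split_ifs <;>
      first
        | rfl
        | (simp only [decide_eq_true_eq, not_le, not_lt, gt_iff_lt] at * <;> omega)
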